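-- pv_equiv track=rewrite | github.com/Nekityyy/Gudkinrep | Gudkin_NY_03_DOP3.py | count_sets_elements
-- ===== SOURCE A (Python) =====
-- def count_sets_elements(l):
--     result = {}
--
--     all_elements = set().union(*l)
--
--     for element in all_elements:
--         count = 0
--
--         for s in l:
--             if element in s:
--                 count += 1
--
--         result[element] = count
--
--     return result
-- ===== SOURCE B (Python) =====
-- def count_sets_elements(l):
--     result = {}
--     for s in l:
--         for element in set(s):
--             result[element] = result.get(element, 0) + 1
--     return result
-- ===== Notes on version B (the rewrite author's own statement) =====
-- stated objective: faster
-- what changed: A builds the union of all sets and, for each element, rescans every set to count membership (O(E*S)); B makes a single pass over the sets, incrementing a per-element counter for each distinct element of each set (O(total elements)).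
import Mathlib
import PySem

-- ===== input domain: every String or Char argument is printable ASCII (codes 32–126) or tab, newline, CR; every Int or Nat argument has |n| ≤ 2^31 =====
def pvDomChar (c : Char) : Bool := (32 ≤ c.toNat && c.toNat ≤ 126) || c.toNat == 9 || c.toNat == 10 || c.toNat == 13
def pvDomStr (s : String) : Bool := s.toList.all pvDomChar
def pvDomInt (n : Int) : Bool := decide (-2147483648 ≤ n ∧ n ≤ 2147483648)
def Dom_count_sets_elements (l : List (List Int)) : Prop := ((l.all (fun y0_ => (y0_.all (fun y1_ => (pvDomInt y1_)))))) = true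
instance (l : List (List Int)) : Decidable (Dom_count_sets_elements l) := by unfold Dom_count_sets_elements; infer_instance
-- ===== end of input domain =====

-- B replaces A's per-element scan over all sets by one pass over the sets incrementing a
-- per-element counter; return value only (neither version mutates its argument).

-- ===== PORT A =====
-- A: all_elements = set().union(*l); for each element, scan every s in l counting membership.
def count_sets_elements (l : List (List Int)) : List (Int × Int) :=
  let all_elements : PySem.Set Int :=
    l.foldl (fun acc s => PySem.Set.union acc s) PySem.Set.empty
  (all_elements.foldl
    (fun result element =>
      result.insert element
        (l.foldl (fun count s => if element ∈ s then count + 1 else count) (0 : Int)))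
    PySem.Dict.empty).items

-- ===== PORT B =====
-- B: one pass; for each set s, increment result[element] for each distinct element of s.
def count_sets_elements_alt (l : List (List Int)) : List (Int × Int) :=
  (l.foldl
    (fun result s =>
      (PySem.Set.ofList s).foldl
        (fun result element => result.insert element (result.getD element 0 + 1)) result)
    PySem.Dict.empty).items

-- ===== PRECONDITION & SPEC =====
def Spec_count_sets_elements (l : List (List Int)) (out : List (Int × Int)) : Prop := out = count_sets_elements_alt l
instance (l : List (List Int)) (out : List (Int × Int)) : Decidable (Spec_count_sets_elements l out) := by unfold Spec_count_sets_elements; infer_instance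

-- ===== CLAIM (what is proved, stated in full; the proofs are below) =====
def Claim_equal_count_sets_elements : Prop := ∀ (l : List (List Int)), Dom_count_sets_elements l → Spec_count_sets_elements l (count_sets_elements l)

-- ===== LEMMAS AND PROOFS =====

-- updating by t and then by s equals updating by (t updated by s): skipping duplicates commutes
theorem pv_update_update (s : List Int) :
    ∀ (t acc : PySem.Set Int),
      PySem.Set.update acc (PySem.Set.update t s) = PySem.Set.update (PySem.Set.update acc t) s := by
  induction s with
  | nil => intro t acc; rfl
  | cons x s ih =>
    intro t acc
    show PySem.Set.update acc (PySem.Set.update (t.add x) s)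
        = PySem.Set.update ((PySem.Set.update acc t).add x) s
    rw [ih]
    congr 1
    by_cases hx : x ∈ t
    · have h2 : x ∈ PySem.Set.update acc t := (PySem.Set.mem_update acc t x).mpr (Or.inr hx)
      simp [PySem.Set.add, PySem.Set.contains, hx, h2]
    · have h1 : t.add x = t ++ [x] := by
        simp [PySem.Set.add, PySem.Set.contains, hx]
      rw [h1]
      show PySem.Set.update acc (t ++ [x]) = (PySem.Set.update acc t).add x
      rw [PySem.Set.update_eq_foldl, List.foldl_append, ← PySem.Set.update_eq_foldl]
      rfl

-- updating with set(s) is the same as updating with s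
theorem pv_update_ofList (acc : PySem.Set Int) (s : List Int) :
    PySem.Set.update acc (PySem.Set.ofList s) = PySem.Set.update acc s := by
  have := pv_update_update s PySem.Set.empty acc
  simpa [PySem.Set.ofList_eq_foldl, ← PySem.Set.update_eq_foldl, PySem.Set.empty] using this

-- A's element set is set(flatten l)
theorem pv_elements_A (l : List (List Int)) :
    l.foldl (fun acc s => PySem.Set.union acc s) PySem.Set.empty
      = PySem.Set.ofList l.flatten := by
  have h : ∀ acc : PySem.Set Int,
      l.foldl (fun acc s => PySem.Set.union acc s) acc = PySem.Set.update acc l.flatten := by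
    induction l with
    | nil => intro acc; rfl
    | cons s l ih =>
      intro acc
      rw [List.foldl_cons, ih, List.flatten_cons]
      simp only [PySem.Set.union_eq_update, PySem.Set.update_eq_foldl, List.foldl_append]
  simpa [PySem.Set.ofList_eq_foldl, ← PySem.Set.update_eq_foldl, PySem.Set.empty] using h []

-- folding add over the per-set deduped concatenation equals folding over the raw concatenation
theorem pv_fold_add_dedup (m : List (List Int)) :
    ∀ acc : PySem.Set Int,
      (m.map (fun s => PySem.Set.ofList s)).flatten.foldl PySem.Set.add acc
        = m.flatten.foldl PySem.Set.add acc := by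
  induction m with
  | nil => intro acc; rfl
  | cons u m ihm =>
    intro acc
    simp only [List.map_cons, List.flatten_cons, List.foldl_append, ihm]
    congr 1
    have := pv_update_ofList acc u
    simpa [PySem.Set.update_eq_foldl] using this

-- B's element set (first occurrences of the per-set deduped concatenation) is the same set
theorem pv_elements_B (l : List (List Int)) :
    PySem.Set.ofList ((l.map (fun s => PySem.Set.ofList s)).flatten)
      = PySem.Set.ofList l.flatten := by
  simpa [PySem.Set.ofList_eq_foldl] using pv_fold_add_dedup l []

-- A's inner count equals the multiplicity of e in B's deduped concatenation
theorem pv_count_eq (l : List (List Int)) (e : Int) :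
    l.foldl (fun count s => if e ∈ s then count + 1 else count) (0 : Int)
      = ((l.map (fun s => PySem.Set.ofList s)).flatten.count e : Int) := by
  induction l with
  | nil => rfl
  | cons s l ih =>
    have hstep : ∀ (a : Int),
        l.foldl (fun count s => if e ∈ s then count + 1 else count) a
          = a + l.foldl (fun count s => if e ∈ s then count + 1 else count) 0 := by
      intro a
      have h1 := PySem.List.foldl_count_if (fun s => decide (e ∈ s)) l a
      have h2 := PySem.List.foldl_count_if (fun s => decide (e ∈ s)) l 0
      simp only [decide_eq_true_eq] at h1 h2
      rw [h1, h2]; ring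
    have hone : ((PySem.Set.ofList s).count e : Int) = if e ∈ s then 1 else 0 := by
      by_cases hm : e ∈ s
      · have hmem : e ∈ PySem.Set.ofList s := (PySem.Set.mem_ofList s e).mpr hm
        rw [List.count_eq_one_of_mem (PySem.Set.nodup_ofList s) hmem]
        simp [hm]
      · have hnot : e ∉ PySem.Set.ofList s := fun h => hm ((PySem.Set.mem_ofList s e).mp h)
        rw [List.count_eq_zero.mpr hnot]
        simp [hm]
    simp only [List.foldl_cons, List.map_cons, List.flatten_cons, List.count_append]
    rw [hstep, ih]
    push_cast
    rw [hone]
-- A's result as a map over the element set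
theorem pv_A_items (l : List (List Int)) :
    count_sets_elements l
      = (PySem.Set.ofList l.flatten).map
          (fun e => (e, l.foldl (fun count s => if e ∈ s then count + 1 else count) (0 : Int))) := by
  unfold count_sets_elements
  rw [pv_elements_A]
  have h := PySem.Dict.items_foldl_insert_fresh (PySem.Set.ofList l.flatten)
    (fun e => e)
    (fun e => l.foldl (fun count s => if e ∈ s then count + 1 else count) (0 : Int))
    PySem.Dict.empty
    (by intro a _; simp)
    (by simp [PySem.Set.nodup_ofList l.flatten])
  simpa using h

-- B's result as a map over the same element set
theorem pv_B_items (l : List (List Int)) :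
    count_sets_elements_alt l
      = (PySem.Set.ofList l.flatten).map
          (fun e => (e, ((l.map (fun s => PySem.Set.ofList s)).flatten.count e : Int))) := by
  unfold count_sets_elements_alt
  rw [← pv_elements_B, ← PySem.Dict.items_counter, ← PySem.Dict.foldl_insert_getD_add_one_eq_counter,
    List.foldl_flatten, List.foldl_map]

-- ===== VERDICT (by name: the statement is the Claim_ definition above) =====
theorem count_sets_elements_spec : Claim_equal_count_sets_elements := by
  intro l _
  show count_sets_elements l = count_sets_elements_alt l
  rw [pv_A_items, pv_B_items]
  exact List.map_congr_left (fun e _ => by rw [pv_count_eq])
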